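-- pv_equiv track=rewrite | github.com/Leapense/problems | 23029번: 시식 코너는 나의 것/gen.py | calc_expected
-- ===== SOURCE A (Python) =====
-- from typing import List, Tuple
--
-- def calc_expected(food: List[int]) -> int:
--     n = len(food)
--     if n == 0:
--         return 0
--
--     dp0 = 0
--     dp1 = food[0]
--     dp2 = 0
--
--     for i in range(1, n):
--         new0 = max(dp0, dp1, dp2)
--         new1 = dp0 + food[i]
--         new2 = dp1 + food[i] // 2
--         dp0, dp1, dp2 = new0, new1, new2
--     return max(dp0, dp1, dp2)
-- ===== SOURCE B (Python) =====
-- from typing import List, Tuple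
--
-- def calc_expected(food: List[int]) -> int:
--     # Prefix-best recurrence over "blocks": a block is either one food taken in
--     # full, or two adjacent foods (full, then half); blocks are separated by at
--     # least one skipped food.  m1/m2/m3 are the best prefix totals M[i-1],
--     # M[i-2], M[i-3]; prev is the previous food value.
--     m3 = m2 = m1 = 0
--     prev = 0
--     i = 0
--     for x in food:
--         i += 1
--         best = max(m1, m2 + x)
--         if i >= 2:
--             best = max(best, m3 + prev + x // 2)
--         m3, m2, m1, prev = m2, m1, best, x
--     return m1
-- ===== Notes on version B (the rewrite author's own statement) =====
-- stated objective: alternative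
-- what changed: Replaces A's 3-state machine DP (states: previous skipped / taken full / taken half) with a prefix-best block recurrence M[i] = max(M[i-1], M[i-2]+food[i-1], M[i-3]+food[i-2]+food[i-1]//2) over blocks of one full food or an adjacent full+half pair, kept as rolling scalars.
import Mathlib
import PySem

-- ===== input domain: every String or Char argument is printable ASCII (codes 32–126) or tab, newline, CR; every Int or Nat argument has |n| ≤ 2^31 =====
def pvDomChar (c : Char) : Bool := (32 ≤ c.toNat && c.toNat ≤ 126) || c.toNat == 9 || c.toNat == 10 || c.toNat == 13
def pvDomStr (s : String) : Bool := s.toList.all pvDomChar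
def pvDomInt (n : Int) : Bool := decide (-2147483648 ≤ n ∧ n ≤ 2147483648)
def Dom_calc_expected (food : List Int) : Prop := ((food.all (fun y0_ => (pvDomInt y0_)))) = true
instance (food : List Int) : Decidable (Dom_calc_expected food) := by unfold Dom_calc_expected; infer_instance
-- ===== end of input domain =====

-- B replaces A's 3-state machine DP with a prefix-best block recurrence
-- M[i] = max(M[i-1], M[i-2]+food[i-1], M[i-3]+food[i-2]+food[i-1]//2)
-- kept as rolling scalars (alternative decomposition, same cost).

-- ===== PORT A =====
-- A's loop body: new0 = max(dp0,dp1,dp2); new1 = dp0 + x; new2 = dp1 + x//2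
def pvStepA (d : Int × Int × Int) (x : Int) : Int × Int × Int :=
  (max (max d.1 d.2.1) d.2.2, d.1 + x, d.2.1 + PySem.Int.floordiv x 2)

def calc_expected (food : List Int) : Int :=
  match food with
  | [] => 0
  | x :: rest =>
    -- dp0=0, dp1=food[0], dp2=0; for i in range(1,n) over food[i]
    let d := rest.foldl pvStepA (0, x, 0)
    max (max d.1 d.2.1) d.2.2

-- ===== PORT B =====
-- B's rolling state: m3,m2,m1 = M[i-3],M[i-2],M[i-1]; prev = food[i-2]; i = counter
structure PvBSt where
  m3 : Int
  m2 : Int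
  m1 : Int
  prev : Int
  i : Int
deriving DecidableEq, Repr

-- B's loop body: i += 1; best = max(m1, m2+x); if i>=2: best = max(best, m3+prev+x//2)
def pvStepB (s : PvBSt) (x : Int) : PvBSt :=
  let i := s.i + 1
  let best := max s.m1 (s.m2 + x)
  let best := if 2 ≤ i then max best (s.m3 + s.prev + PySem.Int.floordiv x 2) else best
  ⟨s.m2, s.m1, best, x, i⟩

def calc_expected_alt (food : List Int) : Int :=
  (food.foldl pvStepB ⟨0, 0, 0, 0, 0⟩).m1

-- ===== PRECONDITION & SPEC =====
def Spec_calc_expected (food : List Int) (out : Int) : Prop := out = calc_expected_alt food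
instance (food : List Int) (out : Int) : Decidable (Spec_calc_expected food out) := by unfold Spec_calc_expected; infer_instance

-- ===== CLAIM (what is proved, stated in full; the proofs are below) =====
def Claim_equal_calc_expected : Prop := ∀ (food : List Int), Dom_calc_expected food → Spec_calc_expected food (calc_expected food)

-- ===== LEMMAS AND PROOFS =====

-- Coupling invariant between A's state d and B's state s at the same prefix.
def pvInv (d : Int × Int × Int) (s : PvBSt) : Prop :=
  s.m1 = max (max d.1 d.2.1) d.2.2 ∧ s.m2 = d.1 ∧ s.m3 + s.prev = d.2.1 ∧ 1 ≤ s.i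

theorem pvInv_step (d : Int × Int × Int) (s : PvBSt) (x : Int)
    (h : pvInv d s) : pvInv (pvStepA d x) (pvStepB s x) := by
  obtain ⟨h1, h2, h3, h4⟩ := h
  unfold pvInv pvStepA pvStepB
  simp only
  rw [if_pos (by omega)]
  refine ⟨?_, ?_, ?_, by omega⟩ <;> simp only [h1, h2, ← h3] <;> try omega

theorem pvInv_fold (xs : List Int) (d : Int × Int × Int) (s : PvBSt)
    (h : pvInv d s) : pvInv (xs.foldl pvStepA d) (xs.foldl pvStepB s) := by
  induction xs generalizing d s with
  | nil => exact h
  | cons x xs ih => exact ih _ _ (pvInv_step d s x h)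

-- ===== VERDICT (by name: the statement is the Claim_ definition above) =====
theorem calc_expected_spec : Claim_equal_calc_expected := by
  intro food _
  unfold Spec_calc_expected calc_expected calc_expected_alt
  cases food with
  | nil => rfl
  | cons x rest =>
    have hbase : pvInv (0, x, 0) (pvStepB ⟨0, 0, 0, 0, 0⟩ x) := by
      unfold pvInv pvStepB
      simp only
      rw [if_neg (by omega)]
      exact ⟨by omega, by trivial, by omega, by omega⟩
    have h := pvInv_fold rest _ _ hbase
    simp only [List.foldl_cons]
    exact (h.1).symm
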